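-- pv_equiv track=rewrite | github.com/ArthurEly/hara | get_diff_estimates.py | sum_estimate_layer_resources
-- ===== SOURCE A (Python) =====
-- def sum_estimate_layer_resources(data):
--     result = {"DSP Blocks": 0, "Total LUTs": 0, "FFs": 0, "BRAM (36k)": 0}
--     for layer, res in data.items():
--         if layer == "total":
--             result["DSP Blocks"] += int(res.get("DSP", 0))
--             result["Total LUTs"] += int(res.get("LUT", 0))
--             result["BRAM (36k)"] += int(res.get("BRAM_18K", 0)) // 2
--     return result
-- ===== SOURCE B (Python) =====
-- def sum_estimate_layer_resources(data):
--     res = data.get("total")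
--     if res is None:
--         return {"DSP Blocks": 0, "Total LUTs": 0, "FFs": 0, "BRAM (36k)": 0}
--     return {"DSP Blocks": int(res.get("DSP", 0)),
--             "Total LUTs": int(res.get("LUT", 0)),
--             "FFs": 0,
--             "BRAM (36k)": int(res.get("BRAM_18K", 0)) // 2}
-- ===== Notes on version B (the rewrite author's own statement) =====
-- stated objective: simpler
-- what changed: Replaces the filtered scan over all dict entries with a single direct lookup of the 'total' key, building the result dict in one expression.
import Mathlib
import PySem

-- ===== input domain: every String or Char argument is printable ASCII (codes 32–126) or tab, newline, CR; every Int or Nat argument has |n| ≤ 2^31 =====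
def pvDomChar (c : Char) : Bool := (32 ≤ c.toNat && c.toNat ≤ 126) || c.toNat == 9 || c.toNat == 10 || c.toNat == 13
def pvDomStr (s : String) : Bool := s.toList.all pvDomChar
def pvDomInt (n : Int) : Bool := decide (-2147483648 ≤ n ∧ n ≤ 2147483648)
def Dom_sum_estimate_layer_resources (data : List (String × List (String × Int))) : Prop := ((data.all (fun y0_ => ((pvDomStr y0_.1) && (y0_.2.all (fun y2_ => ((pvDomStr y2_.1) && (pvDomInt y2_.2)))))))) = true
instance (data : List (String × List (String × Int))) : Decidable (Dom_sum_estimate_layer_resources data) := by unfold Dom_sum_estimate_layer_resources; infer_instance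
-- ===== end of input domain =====

-- B replaces A's filtered scan over every dict entry with one direct lookup of the "total" key (simpler: one expression, no loop).

-- ===== PORT A =====
-- the loop body of A, applied to one (layer, res) item; the result dict's three
-- mutable fields are the accumulator triple (DSP Blocks, Total LUTs, BRAM (36k))
def pvStepA (acc : Int × Int × Int) (p : String × List (String × Int)) : Int × Int × Int :=
  if p.1 == "total" then
    (acc.1 + (PySem.Dict.ofList p.2).getD "DSP" 0,
     acc.2.1 + (PySem.Dict.ofList p.2).getD "LUT" 0,
     acc.2.2 + PySem.Int.floordiv ((PySem.Dict.ofList p.2).getD "BRAM_18K" 0) 2)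
  else acc

def sum_estimate_layer_resources (data : List (String × List (String × Int))) : List (String × Int) :=
  let r := (PySem.Dict.ofList data).items.foldl pvStepA (0, 0, 0)
  [("DSP Blocks", r.1), ("Total LUTs", r.2.1), ("FFs", 0), ("BRAM (36k)", r.2.2)]

-- ===== PORT B =====
def sum_estimate_layer_resources_alt (data : List (String × List (String × Int))) : List (String × Int) :=
  match (PySem.Dict.ofList data).get? "total" with
  | none => [("DSP Blocks", 0), ("Total LUTs", 0), ("FFs", 0), ("BRAM (36k)", 0)]
  | some res =>
    [("DSP Blocks", (PySem.Dict.ofList res).getD "DSP" 0),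
     ("Total LUTs", (PySem.Dict.ofList res).getD "LUT" 0),
     ("FFs", 0),
     ("BRAM (36k)", PySem.Int.floordiv ((PySem.Dict.ofList res).getD "BRAM_18K" 0) 2)]

-- ===== PRECONDITION & SPEC =====
def Spec_sum_estimate_layer_resources (data : List (String × List (String × Int))) (out : List (String × Int)) : Prop := out = sum_estimate_layer_resources_alt data
instance (data : List (String × List (String × Int))) (out : List (String × Int)) : Decidable (Spec_sum_estimate_layer_resources data out) := by unfold Spec_sum_estimate_layer_resources; infer_instance

-- ===== CLAIM (what is proved, stated in full; the proofs are below) =====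
def Claim_equal_sum_estimate_layer_resources : Prop := ∀ (data : List (String × List (String × Int))), Dom_sum_estimate_layer_resources data → Spec_sum_estimate_layer_resources data (sum_estimate_layer_resources data)

-- ===== LEMMAS AND PROOFS =====

-- a stretch of items none of which is keyed "total" leaves the accumulator unchanged
theorem pv_foldl_no_total (l : List (String × List (String × Int)))
    (h : ∀ p ∈ l, p.1 ≠ "total") (acc : Int × Int × Int) :
    l.foldl pvStepA acc = acc := by
  induction l generalizing acc with
  | nil => rfl
  | cons q rest ih =>
    have hq : q.1 ≠ "total" := h q (List.mem_cons_self)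
    simp only [List.foldl_cons, pvStepA, beq_iff_eq, if_neg hq]
    exact ih (fun p hp => h p (List.mem_cons_of_mem _ hp)) acc

-- with pairwise-distinct keys, the scan equals one application at the first "total" item
theorem pv_foldl_total (l : List (String × List (String × Int)))
    (h : (l.map Prod.fst).Nodup) (acc : Int × Int × Int) :
    l.foldl pvStepA acc =
      match l.find? (fun p => p.1 == "total") with
      | none => acc
      | some p => pvStepA acc p := by
  induction l generalizing acc with
  | nil => rfl
  | cons q rest ih =>
    simp only [List.map_cons, List.nodup_cons] at h
    by_cases hq : q.1 = "total"
    · have hrest : ∀ p ∈ rest, p.1 ≠ "total" := by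
        intro p hp hpt
        exact h.1 (by rw [← hq] at hpt; exact hpt ▸ List.mem_map_of_mem hp)
      have hb : (q.1 == "total") = true := by simpa using hq
      simp only [List.foldl_cons, List.find?_cons, hb]
      exact pv_foldl_no_total rest hrest _
    · have hb : (q.1 == "total") = false := by simpa using hq
      simp only [List.foldl_cons, List.find?_cons, hb, pvStepA]
      exact ih h.2 acc

-- ===== VERDICT (by name: the statement is the Claim_ definition above) =====
theorem sum_estimate_layer_resources_spec : Claim_equal_sum_estimate_layer_resources := by
  intro data _
  show _ = _
  unfold sum_estimate_layer_resources sum_estimate_layer_resources_alt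
  have hnd : ((PySem.Dict.ofList data).items.map Prod.fst).Nodup :=
    PySem.Dict.nodup_keys_ofList data
  rw [pv_foldl_total _ hnd]
  cases hres : (PySem.Dict.ofList data).get? "total" with
  | none =>
    have hnk : "total" ∉ (PySem.Dict.ofList data).items.map Prod.fst :=
      (PySem.Dict.get?_eq_none_iff_not_mem_keys _ _).mp hres
    have : (PySem.Dict.ofList data).items.find? (fun p => p.1 == "total") = none := by
      rw [List.find?_eq_none]
      intro p hp
      simp only [beq_iff_eq]
      intro hpt
      exact hnk (hpt ▸ List.mem_map_of_mem hp)
    simp [this]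
  | some res =>
    have hmem : ("total", res) ∈ (PySem.Dict.ofList data).items :=
      PySem.Dict.mem_items_of_get?_eq_some _ hres
    have hsome : ((PySem.Dict.ofList data).items.find? (fun p => p.1 == "total")).isSome := by
      rw [List.find?_isSome]
      exact ⟨("total", res), hmem, by simp⟩
    obtain ⟨q, hq⟩ := Option.isSome_iff_exists.mp hsome
    have hqmem := List.mem_of_find?_eq_some hq
    have hqpred : q.1 = "total" := by
      have := List.find?_some hq; simpa using this
    have hqv : q.2 = res := by
      have := PySem.Dict.get?_of_mem_items (PySem.Dict.ofList data) (k := q.1) (v := q.2)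
        (by exact (by cases q; exact hqmem)) hnd
      rw [hqpred, hres] at this
      exact (Option.some_injective _ this).symm
    rw [hq]
    simp [pvStepA, hqpred, hqv]
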